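-- pv_equiv track=rewrite | github.com/manii190/csc-110 | infofile.py | count_punctuated
-- ===== SOURCE A (Python) =====
-- def count_punctuated(word_counts):
--     '''
--     Counts the punctuated and non-punctuated words.
--
--     Args:
--         word_counts (dict): A dictionary of word counts.
--
--     Returns:
--         tuple: Two roundegers representing the number
--         of punctuated and non-punctuated words.
--     '''
--     punctuated = 0
--     non_punctuated = 0
--     for word in word_counts:
--         if word[-1] in ".,!?;:":
--             punctuated += 1
--         else:
--             non_punctuated += 1
--     return punctuated, non_punctuated
-- ===== SOURCE B (Python) =====
-- def count_punctuated(word_counts):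
--     tally = {}
--     for w in word_counts:
--         c = w[-1]
--         tally[c] = tally.get(c, 0) + 1
--     punctuated = sum(tally.get(c, 0) for c in ".,!?;:")
--     return punctuated, len(word_counts) - punctuated
-- ===== Notes on version B (the rewrite author's own statement) =====
-- stated objective: alternative
-- what changed: Builds a histogram (dict) of each word's final character in one pass, then obtains the punctuated count by summing the six punctuation buckets of the histogram and the non-punctuated count from the dict size; the per-word membership test and the two parallel counters disappear.
import Mathlib
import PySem

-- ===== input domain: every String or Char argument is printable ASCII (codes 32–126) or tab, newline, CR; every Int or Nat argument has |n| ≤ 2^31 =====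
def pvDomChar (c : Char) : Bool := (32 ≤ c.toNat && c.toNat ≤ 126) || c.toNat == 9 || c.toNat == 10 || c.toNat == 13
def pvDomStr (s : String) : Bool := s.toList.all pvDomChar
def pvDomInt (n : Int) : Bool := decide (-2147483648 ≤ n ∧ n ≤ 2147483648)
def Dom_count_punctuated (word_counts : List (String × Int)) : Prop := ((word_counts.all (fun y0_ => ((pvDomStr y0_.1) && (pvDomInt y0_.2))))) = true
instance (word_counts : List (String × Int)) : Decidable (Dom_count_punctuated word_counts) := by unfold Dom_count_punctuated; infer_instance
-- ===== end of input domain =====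

-- B builds a histogram of final characters, then sums the six punctuation buckets and derives the other count from the dict size (alternative decomposition).


-- ===== PORT A =====
-- 'for word in word_counts' iterates the dict's keys: the distinct keys in first-occurrence order.
def count_punctuated (word_counts : List (String × Int)) : Int × Int :=
  (PySem.List.dedup (word_counts.map Prod.fst)).foldl
    (fun st word =>
      match PySem.Str.pyGet? word (-1) with
      | none => st  -- Python raises IndexError here; excluded by Pre_
      | some c => if [ '.', ',', '!', '?', ';', ':' ].contains c
                  then (st.1 + 1, st.2) else (st.1, st.2 + 1))
    (0, 0)

-- ===== PORT B =====
def count_punctuated_alt (word_counts : List (String × Int)) : Int × Int :=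
  let keys := PySem.List.dedup (word_counts.map Prod.fst)
  let tally := keys.foldl
    (fun d w =>
      match PySem.Str.pyGet? w (-1) with
      | none => d  -- Python raises IndexError here; excluded by Pre_
      | some c => d.insert c (d.getD c 0 + 1))
    (PySem.Dict.empty : PySem.Dict Char Int)
  let punctuated := [ '.', ',', '!', '?', ';', ':' ].foldl (fun a c => a + tally.getD c 0) 0
  (punctuated, (keys.length : Int) - punctuated)

-- ===== PRECONDITION & SPEC =====
-- Pre_ excludes inputs containing a zero-length key, on which both Pythons raise IndexError when indexing the last character.
def Pre_count_punctuated (word_counts : List (String × Int)) : Prop :=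
  ∀ p ∈ word_counts, p.1 ≠ ""
instance (word_counts : List (String × Int)) : Decidable (Pre_count_punctuated word_counts) := by unfold Pre_count_punctuated; infer_instance
def pvWitness_count_punctuated : (List (String × Int)) := [("hi.", 2), ("yes", 1)]
def Spec_count_punctuated (word_counts : List (String × Int)) (out : Int × Int) : Prop := out = count_punctuated_alt word_counts
instance (word_counts : List (String × Int)) (out : Int × Int) : Decidable (Spec_count_punctuated word_counts out) := by unfold Spec_count_punctuated; infer_instance

-- ===== CLAIM (what is proved, stated in full; the proofs are below) =====
def Claim_equal_count_punctuated : Prop := ∀ (word_counts : List (String × Int)), Dom_count_punctuated word_counts → Pre_count_punctuated word_counts → Spec_count_punctuated word_counts (count_punctuated word_counts)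

-- ===== LEMMAS AND PROOFS =====
-- Single-counter view of a word's contribution to the punctuated count.
def pvStepB (acc : Int) (word : String) : Int :=
  match PySem.Str.pyGet? word (-1) with
  | none => acc
  | some c => if [ '.', ',', '!', '?', ';', ':' ].contains c then acc + 1 else acc

lemma pvStepB_eq (a : Int) (w : String) : pvStepB a w = a + pvStepB 0 w := by
  cases h : PySem.Str.pyGet? w (-1) with
  | none => simp only [pvStepB, h]; omega
  | some c => simp only [pvStepB, h]; split <;> omega

-- Sum of the six punctuation buckets of a histogram.
def pvSumP (d : PySem.Dict Char Int) : Int :=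
  [ '.', ',', '!', '?', ';', ':' ].foldl (fun a c => a + d.getD c 0) 0

-- Incrementing a bucket raises the punctuation sum by 1 iff the bucket is a punctuation character.
lemma pvSumP_bump (d : PySem.Dict Char Int) (x : Char) :
    pvSumP (d.insert x (d.getD x 0 + 1)) =
      pvSumP d + (if [ '.', ',', '!', '?', ';', ':' ].contains x then 1 else 0) := by
  rcases eq_or_ne x '.' with rfl | h1
  · simp [pvSumP, List.foldl, PySem.Dict.getD_insert]; ring
  rcases eq_or_ne x ',' with rfl | h2
  · simp [pvSumP, List.foldl, PySem.Dict.getD_insert]; ring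
  rcases eq_or_ne x '!' with rfl | h3
  · simp [pvSumP, List.foldl, PySem.Dict.getD_insert]; ring
  rcases eq_or_ne x '?' with rfl | h4
  · simp [pvSumP, List.foldl, PySem.Dict.getD_insert]; ring
  rcases eq_or_ne x ';' with rfl | h5
  · simp [pvSumP, List.foldl, PySem.Dict.getD_insert]; ring
  rcases eq_or_ne x ':' with rfl | h6
  · simp [pvSumP, List.foldl, PySem.Dict.getD_insert]; ring
  have c1 : ¬ ('.' = x) := fun h => h1 h.symm
  have c2 : ¬ (',' = x) := fun h => h2 h.symm
  have c3 : ¬ ('!' = x) := fun h => h3 h.symm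
  have c4 : ¬ ('?' = x) := fun h => h4 h.symm
  have c5 : ¬ (';' = x) := fun h => h5 h.symm
  have c6 : ¬ (':' = x) := fun h => h6 h.symm
  simp [pvSumP, List.foldl, PySem.Dict.getD_insert, c1, c2, c3, c4, c5, c6, h1, h2, h3, h4, h5, h6]

-- The single-counter fold shifts over its accumulator.
lemma foldB_shift (l : List String) (a : Int) :
    l.foldl pvStepB a = a + l.foldl pvStepB 0 := by
  induction l generalizing a with
  | nil => simp
  | cons s t ih =>
    simp only [List.foldl_cons]
    rw [ih (pvStepB a s), ih (pvStepB 0 s), pvStepB_eq a s]; ring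

-- The histogram fold's punctuation sum equals the single-counter fold.
lemma pvSumP_fold (l : List String) (d : PySem.Dict Char Int) :
    pvSumP (l.foldl
      (fun d w =>
        match PySem.Str.pyGet? w (-1) with
        | none => d
        | some c => d.insert c (d.getD c 0 + 1)) d)
    = pvSumP d + l.foldl pvStepB 0 := by
  induction l generalizing d with
  | nil => simp
  | cons s t ih =>
    simp only [List.foldl_cons]
    rw [ih]
    rw [foldB_shift t (pvStepB 0 s)]
    cases h : PySem.Str.pyGet? s (-1) with
    | none => simp only [pvStepB, h]; ring
    | some c => rw [pvSumP_bump]; simp only [pvStepB, h]; split <;> ring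

-- A's pair-fold in terms of the single counter.
lemma fold_pair_eq (l : List String) (p np : Int) (h : ∀ s ∈ l, s ≠ "") :
    l.foldl
      (fun st word =>
        match PySem.Str.pyGet? word (-1) with
        | none => st
        | some c => if [ '.', ',', '!', '?', ';', ':' ].contains c
                    then (st.1 + 1, st.2) else (st.1, st.2 + 1))
      (p, np)
    = (p + l.foldl pvStepB 0, np + ((l.length : Int) - l.foldl pvStepB 0)) := by
  induction l generalizing p np with
  | nil => simp
  | cons s t ih =>
    have hs : s ≠ "" := h s (by simp)
    obtain ⟨c, hc⟩ : ∃ c, PySem.Str.pyGet? s (-1) = some c := by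
      have : (PySem.Str.pyGet? s (-1)).isSome := by
        simpa [PySem.Str.pyGet?, PySem.List.pyGet?_neg_one] using hs
      exact Option.isSome_iff_exists.mp this
    have ht : ∀ x ∈ t, x ≠ "" := fun x hx => h x (by simp [hx])
    have hstep : pvStepB 0 s =
        (if [ '.', ',', '!', '?', ';', ':' ].contains c then (1 : Int) else 0) := by
      simp only [pvStepB, hc]; split <;> omega
    by_cases hmem : [ '.', ',', '!', '?', ';', ':' ].contains c
    · simp only [List.foldl_cons, hc, hmem, if_true]
      rw [ih _ _ ht, foldB_shift t (pvStepB 0 s), hstep, if_pos hmem]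
      simp only [Prod.mk.injEq, List.length_cons]
      constructor <;> push_cast <;> omega
    · simp only [List.foldl_cons, hc, hmem]
      rw [ih _ _ ht, foldB_shift t (pvStepB 0 s), hstep, if_neg hmem]
      simp only [Prod.mk.injEq, List.length_cons]
      constructor <;> push_cast <;> omega

-- ===== VERDICT (by name: the statement is the Claim_ definition above) =====
theorem count_punctuated_spec : Claim_equal_count_punctuated := by
  intro wc _ hpre
  unfold Spec_count_punctuated count_punctuated count_punctuated_alt
  have hkeys : ∀ s ∈ PySem.List.dedup (wc.map Prod.fst), s ≠ "" := by
    intro s hs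
    rw [PySem.List.mem_dedup] at hs
    obtain ⟨p, hp, rfl⟩ := List.mem_map.mp hs
    exact hpre p hp
  rw [fold_pair_eq _ 0 0 hkeys]
  have := pvSumP_fold (PySem.List.dedup (wc.map Prod.fst)) PySem.Dict.empty
  simp only [pvSumP] at this
  simp only [this]
  simp [PySem.Dict.getD, PySem.Dict.get?, PySem.Dict.empty]
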